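-- pv_equiv track=rewrite | github.com/ElviraAsadullina/Python_Homework_Seminar_4 | Task_3.py | get_unique_collection
-- ===== SOURCE A (Python) =====
-- def get_unique_collection(my_list):
--     unique_list = []
--     viewed_list = []
--     for i in my_list:
--         if i not in viewed_list:
--             viewed_list.append(i)
--             unique_list.append(i)
--         else:
--             if i in unique_list:
--                 k = unique_list.index(i)
--                 del unique_list[k]
--     return unique_list
-- ===== SOURCE B (Python) =====
-- def get_unique_collection(my_list):
--     counts = {}
--     for x in my_list:
--         counts[x] = counts.get(x, 0) + 1
--     return [x for x in my_list if counts[x] == 1]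
-- ===== Notes on version B (the rewrite author's own statement) =====
-- stated objective: faster
-- what changed: Replaces A's stateful build-and-prune (two accumulator lists, append on first sight, index-and-delete on repeat, all with linear membership scans) with one counting pass building a frequency dictionary followed by a filter keeping elements of global count 1.
import Mathlib
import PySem

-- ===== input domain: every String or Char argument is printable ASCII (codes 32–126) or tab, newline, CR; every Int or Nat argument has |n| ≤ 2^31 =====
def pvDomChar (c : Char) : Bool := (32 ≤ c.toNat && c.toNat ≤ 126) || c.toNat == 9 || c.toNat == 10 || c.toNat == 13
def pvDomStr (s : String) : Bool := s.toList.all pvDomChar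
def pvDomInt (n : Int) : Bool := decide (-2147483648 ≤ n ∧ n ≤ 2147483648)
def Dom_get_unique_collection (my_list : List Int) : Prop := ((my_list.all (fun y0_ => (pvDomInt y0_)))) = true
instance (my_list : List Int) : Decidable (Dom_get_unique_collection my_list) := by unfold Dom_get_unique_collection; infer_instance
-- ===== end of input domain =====

-- ===== PORT A =====
-- B replaces A's stateful build-and-prune (append on first sight, index-and-delete on repeat) with one counting pass (frequency dict) plus a filter on count == 1; objective: faster (measured).
def get_unique_collection_loop : List Int → List Int → List Int → List Int
  | [], unique, _ => unique
  | i :: rest, unique, viewed =>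
    if i ∈ viewed then
      if i ∈ unique then
        match PySem.List.index? unique i with
        | some k => get_unique_collection_loop rest (unique.eraseIdx k) viewed
        | none => get_unique_collection_loop rest unique viewed
      else
        get_unique_collection_loop rest unique viewed
    else
      get_unique_collection_loop rest (unique ++ [i]) (viewed ++ [i])

def get_unique_collection (my_list : List Int) : List Int :=
  get_unique_collection_loop my_list [] []

-- ===== PORT B =====
-- counts = {}; counts[x] = counts.get(x, 0) + 1 per element; then filter on counts[x] == 1.
-- (counts[x] in the comprehension: x ∈ my_list, so the key is always present and getD is exact there.)
def get_unique_collection_alt (my_list : List Int) : List Int :=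
  let counts : PySem.Dict Int Int :=
    my_list.foldl (fun d x => d.insert x (d.getD x 0 + 1)) PySem.Dict.empty
  my_list.filter (fun x => counts.getD x 0 == 1)

-- ===== PRECONDITION & SPEC =====
def Spec_get_unique_collection (my_list : List Int) (out : List Int) : Prop := out = get_unique_collection_alt my_list
instance (my_list : List Int) (out : List Int) : Decidable (Spec_get_unique_collection my_list out) := by unfold Spec_get_unique_collection; infer_instance

-- ===== CLAIM (what is proved, stated in full; the proofs are below) =====
def Claim_equal_get_unique_collection : Prop := ∀ (my_list : List Int), Dom_get_unique_collection my_list → Spec_get_unique_collection my_list (get_unique_collection my_list)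

-- ===== LEMMAS AND PROOFS =====

theorem pv_eraseIdx_append_cons (pre suf : List Int) (a : Int) :
    (pre ++ a :: suf).eraseIdx pre.length = pre ++ suf := by
  induction pre with
  | nil => rfl
  | cons b pre ih => simpa using ih

-- Invariant of A's loop: having processed the prefix p (viewed ≡ membership in p,
-- unique = the elements of p of multiplicity 1, in order), the loop computes the
-- multiplicity-1 filter of the whole list.
theorem get_unique_collection_loop_invariant :
    ∀ (rest p v : List Int), (∀ x, x ∈ v ↔ x ∈ p) →
      get_unique_collection_loop rest (p.filter (fun x => p.count x == 1)) v
        = (p ++ rest).filter (fun x => (p ++ rest).count x == 1) := by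
  intro rest
  induction rest with
  | nil => intro p v _; simp [get_unique_collection_loop]
  | cons i rest ih =>
    intro p v hv
    simp only [get_unique_collection_loop]
    by_cases hiv : i ∈ v
    · have hip : i ∈ p := (hv i).mp hiv
      rw [if_pos hiv]
      have hveq : ∀ x, x ∈ v ↔ x ∈ p ++ [i] := by
        intro x
        constructor
        · intro hx; exact List.mem_append_left _ ((hv x).mp hx)
        · intro hx
          rcases List.mem_append.mp hx with h | h
          · exact (hv x).mpr h
          · simp at h; subst h; exact hiv
      have hassoc : (p ++ [i]) ++ rest = p ++ i :: rest := by simp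
      by_cases hiu : i ∈ p.filter (fun x => p.count x == 1)
      · have hcnt : p.count i = 1 := by simpa using List.of_mem_filter hiu
        have hnd : (p.filter (fun x => p.count x == 1)).Nodup := by
          rw [List.nodup_iff_count_le_one]
          intro a
          by_cases hmem : a ∈ p.filter (fun x => p.count x == 1)
          · have ha : p.count a = 1 := by simpa using List.of_mem_filter hmem
            have hsub : (p.filter (fun x => p.count x == 1)).Sublist p := List.filter_sublist
            have hle : (p.filter (fun x => p.count x == 1)).count a ≤ p.count a :=
              hsub.count_le a
            omega
          · simp [List.count_eq_zero_of_not_mem hmem]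
        rcases hidx : PySem.List.index? (p.filter (fun x => p.count x == 1)) i with _ | k
        · exact (((PySem.List.index?_eq_none_iff _ _).mp hidx) hiu).elim
        · rw [if_pos hiu]
          show get_unique_collection_loop rest
              ((p.filter (fun x => p.count x == 1)).eraseIdx k) v
            = (p ++ i :: rest).filter (fun x => (p ++ i :: rest).count x == 1)
          obtain ⟨pre, suf, huniq, hlen, hpre⟩ := (PySem.List.index?_eq_some_iff _ _ _).mp hidx
          subst hlen
          rw [huniq, pv_eraseIdx_append_cons]
          have hsuf : i ∉ suf := by
            rw [huniq] at hnd
            rcases (List.nodup_append.mp hnd) with ⟨_, hnd2, _⟩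
            exact (List.nodup_cons.mp hnd2).1
          have hkey : (p ++ [i]).filter (fun x => (p ++ [i]).count x == 1) = pre ++ suf := by
            rw [List.filter_append]
            have hfi : (i :: (List.nil : List Int)).filter (fun x => (p ++ [i]).count x == 1) = [] := by
              simp [List.count_append, hcnt]
            have hcong : p.filter (fun x => (p ++ [i]).count x == 1)
                = p.filter (fun x => !(x == i) && (p.count x == 1)) := by
              apply List.filter_congr
              intro x hx
              by_cases hxi : x = i
              · subst hxi; simp [List.count_append, hcnt]
              · simp [List.count_append, Ne.symm hxi, hxi]
            rw [hcong]
            have hsplit : p.filter (fun x => !(x == i) && (p.count x == 1))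
                = (p.filter (fun x => p.count x == 1)).filter (fun x => !(x == i)) :=
              List.filter_filter.symm
            rw [hsplit, huniq, List.filter_append]
            have h1 : pre.filter (fun x => !(x == i)) = pre :=
              List.filter_eq_self.mpr (fun a ha => by
                simp; exact fun h => hpre (h ▸ ha))
            have h2 : (i :: suf).filter (fun x => !(x == i)) = suf := by
              have h3 : suf.filter (fun x => !(x == i)) = suf :=
                List.filter_eq_self.mpr (fun a ha => by
                  simp; exact fun h => hsuf (h ▸ ha))
              simp [h3]
            rw [h1, h2, hfi, List.append_nil]
          rw [← hassoc, ← hkey]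
          exact ih (p ++ [i]) v hveq
      · rw [if_neg hiu]
        have h2 : (p ++ [i]).filter (fun x => (p ++ [i]).count x == 1)
            = p.filter (fun x => p.count x == 1) := by
          rw [List.filter_append]
          have h1c : 1 ≤ p.count i := List.one_le_count_iff.mpr hip
          have hcint : (p.count i == 1) = false := by
            by_cases h : p.count i = 1
            · exact absurd (List.mem_filter.mpr ⟨hip, by simp [h]⟩) hiu
            · simp [h]
          have hfi : (i :: (List.nil : List Int)).filter (fun x => (p ++ [i]).count x == 1) = [] := by
            simp [List.count_append]
            omega
          have hcong : p.filter (fun x => (p ++ [i]).count x == 1) = p.filter (fun x => p.count x == 1) := by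
            apply List.filter_congr
            intro x hx
            by_cases hxi : x = i
            · subst hxi
              simp [List.count_append, hcint]
              omega
            · simp [List.count_append, Ne.symm hxi]
          rw [hcong, hfi, List.append_nil]
        rw [← hassoc, ← h2]
        exact ih (p ++ [i]) v hveq
    · have hip : i ∉ p := fun h => hiv ((hv i).mpr h)
      rw [if_neg hiv]
      have h2 : (p ++ [i]).filter (fun x => (p ++ [i]).count x == 1)
          = p.filter (fun x => p.count x == 1) ++ [i] := by
        rw [List.filter_append]
        have h0 : p.count i = 0 := List.count_eq_zero_of_not_mem hip
        have hfi : (i :: (List.nil : List Int)).filter (fun x => (p ++ [i]).count x == 1) = [i] := by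
          simp [List.count_append, h0]
        have hcong : p.filter (fun x => (p ++ [i]).count x == 1) = p.filter (fun x => p.count x == 1) := by
          apply List.filter_congr
          intro x hx
          have hxi : x ≠ i := fun h => hip (h ▸ hx)
          simp [List.count_append, Ne.symm hxi]
        rw [hcong, hfi]
      rw [← h2]
      have hveq : ∀ x, x ∈ v ++ [i] ↔ x ∈ p ++ [i] := by intro x; simp [hv x]
      have := ih (p ++ [i]) (v ++ [i]) hveq
      simpa using this

-- ===== VERDICT (by name: the statement is the Claim_ definition above) =====
theorem get_unique_collection_spec : Claim_equal_get_unique_collection := by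
  intro my_list _
  unfold Spec_get_unique_collection get_unique_collection get_unique_collection_alt
  show get_unique_collection_loop my_list [] []
      = List.filter (fun x => ((List.foldl (fun d x => d.insert x (d.getD x 0 + 1))
          (PySem.Dict.empty : PySem.Dict Int Int) my_list).getD x 0 == 1)) my_list
  have h := get_unique_collection_loop_invariant my_list [] [] (by simp)
  simp only [List.nil_append, List.filter_nil, List.count_nil] at h
  rw [h]
  apply List.filter_congr
  intro x _
  have hc : ((my_list.foldl (fun d x => d.insert x (d.getD x 0 + 1))
      (PySem.Dict.empty : PySem.Dict Int Int)).getD x 0)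
      = (my_list.count x : Int) := by simp [pysem]
  rw [hc]
  rcases eq_or_ne (my_list.count x) 1 with hcn | hcn
  · simp [hcn]
  · have hcn' : (my_list.count x : Int) ≠ 1 := by exact_mod_cast hcn
    simp [hcn, hcn']
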